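-- pv_equiv track=rewrite | github.com/henrieger/csp-backtracking | dimacs_to_csp.py | generate_tuples
-- ===== SOURCE A (Python) =====
-- def binary(i: int, digits: int) -> str:
--     return " ".join(list(str(bin(i))[2:].rjust(digits, "0")))
--
-- def generate_tuples(vars):
--     var = vars[0]
--     positive_value = 1 if var > 0 else 0
--     negative_value = 1 - positive_value
--     digits = len(vars) - 1
--
--     if len(vars) == 1:
--         yield str(positive_value)
--         return
--
--     for i in range(0, 2 ** (len(vars) - 1), 1):
--         yield f"{positive_value} {binary(i, digits)}"
--
--     yield from (f"{negative_value} {t}" for t in generate_tuples(vars[1:]))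
-- ===== SOURCE B (Python) =====
-- def generate_tuples(literals):
--     n = len(literals)
--     pos = [1 if v > 0 else 0 for v in literals]
--     for k in range(n):
--         values = [str(1 - p) for p in pos[:k]] + [str(pos[k])]
--         m = n - 1 - k
--         for i in range(2 ** m):
--             bits = format(i, "b").rjust(m, "0") if m else ""
--             yield " ".join(values + list(bits))
-- ===== Notes on version B (the rewrite author's own statement) =====
-- stated objective: alternative
-- what changed: Replaces A's tail recursion on the literal list by an explicit double loop over k, the index of the first satisfied literal, joining a prefix of values with the binary suffix of each counter value.
import Mathlib
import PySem

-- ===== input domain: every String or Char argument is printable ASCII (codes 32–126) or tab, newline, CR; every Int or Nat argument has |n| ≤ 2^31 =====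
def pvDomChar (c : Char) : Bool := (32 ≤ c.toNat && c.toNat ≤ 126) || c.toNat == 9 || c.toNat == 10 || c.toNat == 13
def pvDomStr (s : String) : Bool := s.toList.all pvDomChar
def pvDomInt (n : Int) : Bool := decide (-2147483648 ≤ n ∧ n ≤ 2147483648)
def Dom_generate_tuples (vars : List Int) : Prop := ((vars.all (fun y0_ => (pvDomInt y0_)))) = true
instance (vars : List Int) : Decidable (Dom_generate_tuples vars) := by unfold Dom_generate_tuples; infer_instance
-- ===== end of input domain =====

-- B replaces A's tail recursion by a double loop over the index of the first satisfied
-- literal (objective: alternative decomposition, same output order and cost).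

-- ===== PORT A =====
-- bin(i)[2:] for i ≥ 0: binary digits, most significant first ("0" for 0) — exact for Nat
def pvBin (i : Nat) : List Char := Nat.toDigits 2 i
-- s.rjust(d, "0") — exact (pads on the left up to length d)
def pvRjust (s : List Char) (d : Nat) : List Char := List.replicate (d - s.length) '0' ++ s
-- " ".join(l) — exact
def pvJoinSp : List String → String
  | [] => ""
  | [a] => a
  | a :: b :: rest => a ++ " " ++ pvJoinSp (b :: rest)

def binary (i : Nat) (digits : Nat) : String :=
  pvJoinSp ((pvRjust (pvBin i) digits).map (fun c => String.mk [c]))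

def generate_tuples (vars : List Int) : List String :=
  match vars with
  | [] => []   -- vars[0] raises IndexError in Python; excluded by Pre_generate_tuples
  | var :: rest =>
    let positive_value : Int := if var > 0 then 1 else 0
    let negative_value : Int := 1 - positive_value
    let digits := rest.length   -- len(vars) - 1
    if rest.isEmpty then
      [PySem.Int.toStr positive_value]
    else
      ((List.range (2 ^ digits)).map (fun i =>
          PySem.Int.toStr positive_value ++ " " ++ binary i digits))
      ++ (generate_tuples rest).map (fun t => PySem.Int.toStr negative_value ++ " " ++ t)

-- ===== PORT B =====
-- format(i, "b").rjust(m, "0") if m else "" — as a list of one-char strings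
def pvBits (i : Nat) (m : Nat) : List String :=
  if m = 0 then [] else (pvRjust (pvBin i) m).map (fun c => String.mk [c])

def generate_tuples_alt (vars : List Int) : List String :=
  let n := vars.length
  let pos := vars.map (fun v => if v > 0 then (1 : Int) else 0)
  (List.range n).flatMap (fun k =>
    let values := ((pos.take k).map (fun p => PySem.Int.toStr (1 - p)))
                    ++ [PySem.Int.toStr (pos.getD k 0)]   -- pos[k]: k < n, always in range
    let m := n - 1 - k
    (List.range (2 ^ m)).map (fun i => pvJoinSp (values ++ pvBits i m)))

-- ===== PRECONDITION & SPEC =====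
-- Pre_ excludes only the empty list, on which Python A raises IndexError (vars[0]).
def Pre_generate_tuples (vars : List Int) : Prop := vars ≠ []
instance (vars : List Int) : Decidable (Pre_generate_tuples vars) := by
  unfold Pre_generate_tuples; infer_instance
def pvWitness_generate_tuples : List Int := [1, -2]

def Spec_generate_tuples (vars : List Int) (out : List String) : Prop := out = generate_tuples_alt vars
instance (vars : List Int) (out : List String) : Decidable (Spec_generate_tuples vars out) := by unfold Spec_generate_tuples; infer_instance

-- ===== CLAIM (what is proved, stated in full; the proofs are below) =====
def Claim_equal_generate_tuples : Prop := ∀ (vars : List Int), Dom_generate_tuples vars → Pre_generate_tuples vars → Spec_generate_tuples vars (generate_tuples vars)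

-- ===== LEMMAS AND PROOFS =====

theorem pvJoinSp_cons (a : String) (l : List String) (h : l ≠ []) :
    pvJoinSp (a :: l) = a ++ " " ++ pvJoinSp l := by
  cases l with
  | nil => exact absurd rfl h
  | cons b t => rfl

theorem pvBits_ne_nil (i m : Nat) (h : m ≠ 0) : pvBits i m ≠ [] := by
  unfold pvBits pvRjust
  rw [if_neg h]
  intro hc
  have h2 : pvBin i = [] := (List.append_eq_nil_iff.mp (List.map_eq_nil_iff.mp hc)).2
  have h1 := (List.append_eq_nil_iff.mp (List.map_eq_nil_iff.mp hc)).1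
  rw [h2] at h1
  simp at h1
  exact h h1

theorem binary_eq_join (i m : Nat) (h : m ≠ 0) : binary i m = pvJoinSp (pvBits i m) := by
  unfold binary pvBits
  rw [if_neg h]

theorem alt_singleton (v : Int) :
    generate_tuples_alt [v] = [PySem.Int.toStr (if v > 0 then (1 : Int) else 0)] := by
  simp [generate_tuples_alt, pvBits, pvJoinSp, List.range_succ]

theorem alt_cons (v : Int) (rest : List Int) (h : rest ≠ []) :
    generate_tuples_alt (v :: rest) =
      ((List.range (2 ^ rest.length)).map (fun i =>
          PySem.Int.toStr (if v > 0 then (1 : Int) else 0) ++ " " ++ binary i rest.length))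
      ++ (generate_tuples_alt rest).map
          (fun t => PySem.Int.toStr (1 - (if v > 0 then (1 : Int) else 0)) ++ " " ++ t) := by
  have hr : rest.length ≠ 0 := by simpa using h
  unfold generate_tuples_alt
  simp only [List.length_cons, List.map_cons, List.range_succ_eq_map, List.flatMap_cons,
    List.flatMap_map]
  congr 1
  · -- first block: k = 0
    apply List.map_congr_left
    intro i _
    simp only [List.take_zero, List.map_nil, List.getD_cons_zero, List.nil_append,
      Nat.add_sub_cancel, Nat.sub_zero, List.cons_append]
    rw [pvJoinSp_cons _ _ (pvBits_ne_nil i rest.length hr), binary_eq_join i rest.length hr]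
  · -- remaining blocks: k+1 in v::rest is k in rest with one more leading value
    rw [List.map_flatMap]
    apply List.flatMap_congr
    intro k hk
    rw [List.map_map]
    have hm : rest.length + 1 - 1 - k.succ = rest.length - 1 - k := by omega
    rw [hm]
    apply List.map_congr_left
    intro i _
    simp only [Function.comp, List.take_succ_cons, List.map_cons, List.getD_cons_succ,
      List.cons_append]
    rw [pvJoinSp_cons]
    simp

theorem equal_of_ne_nil (vars : List Int) (h : vars ≠ []) :
    generate_tuples vars = generate_tuples_alt vars := by
  induction vars with
  | nil => exact absurd rfl h
  | cons v rest ih =>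
    by_cases hrest : rest = []
    · subst hrest
      simp [generate_tuples, alt_singleton]
    · rw [alt_cons v rest hrest, ← ih hrest]
      simp only [generate_tuples]
      rw [if_neg (show ¬rest.isEmpty = true by simp [hrest])]

-- ===== VERDICT (by name: the statement is the Claim_ definition above) =====
theorem generate_tuples_spec : Claim_equal_generate_tuples := by
  intro vars _ hpre
  exact equal_of_ne_nil vars hpre
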